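-- pv_equiv track=rewrite | github.com/mrgrit/packetarena | pkgen/pkgen_by_suricata_rules_pilot.py | is_public_ipv4
-- ===== SOURCE A (Python) =====
-- import argparse, os, re, json, random, time, hashlib, logging, ipaddress
--
-- PRIVATE_NETS = [
--     ipaddress.ip_network("10.0.0.0/8"),
--     ipaddress.ip_network("172.16.0.0/12"),
--     ipaddress.ip_network("192.168.0.0/16"),
--     ipaddress.ip_network("127.0.0.0/8"),
--     ipaddress.ip_network("169.254.0.0/16"),
--     ipaddress.ip_network("224.0.0.0/4"),
--     ipaddress.ip_network("240.0.0.0/4"),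
-- ]
--
-- def is_public_ipv4(ip: str) -> bool:
--     try:
--         ip4 = ipaddress.ip_address(ip)
--         if ip4.version != 4:
--             return False
--         for n in PRIVATE_NETS:
--             if ip4 in n: return False
--         return True
--     except Exception:
--         return False
-- ===== SOURCE B (Python) =====
-- import re
--
-- _OCTET = r'(25[0-5]|2[0-4][0-9]|1[0-9][0-9]|[1-9][0-9]|[0-9])'
-- _IPV4 = re.compile(_OCTET + r'\.' + _OCTET + r'\.' + _OCTET + r'\.' + _OCTET)
--
-- def is_public_ipv4(ip: str) -> bool:
--     m = _IPV4.fullmatch(ip)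
--     if m is None:
--         return False
--     o0, o1 = int(m.group(1)), int(m.group(2))
--     return not (o0 == 10 or o0 == 127
--                 or (o0 == 172 and 16 <= o1 <= 31)
--                 or (o0 == 192 and o1 == 168)
--                 or (o0 == 169 and o1 == 254)
--                 or o0 >= 224)
-- ===== Notes on version B (the rewrite author's own statement) =====
-- stated objective: simpler
-- what changed: B replaces A's ipaddress parse plus containment loop over seven ipaddress network objects with a single strict-IPv4 regex fullmatch and direct arithmetic range tests on the first two octets (o0>=224 covering both the 224/4 and 240/4 blocks).
import Mathlib
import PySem

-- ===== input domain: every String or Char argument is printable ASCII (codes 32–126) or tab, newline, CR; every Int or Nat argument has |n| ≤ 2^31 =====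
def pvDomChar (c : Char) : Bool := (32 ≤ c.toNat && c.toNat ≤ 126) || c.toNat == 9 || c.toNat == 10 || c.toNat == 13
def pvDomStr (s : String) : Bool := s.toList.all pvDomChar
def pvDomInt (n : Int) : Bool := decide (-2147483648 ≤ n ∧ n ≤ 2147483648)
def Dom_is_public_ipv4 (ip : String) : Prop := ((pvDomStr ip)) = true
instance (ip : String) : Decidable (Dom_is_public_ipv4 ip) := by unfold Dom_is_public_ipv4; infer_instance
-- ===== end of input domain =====

-- B replaces A's ipaddress parse + containment loop over seven network objects with a strict-IPv4
-- regex fullmatch and direct octet-range arithmetic on the first two octets (objective: simpler).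

-- ===== PORT A =====
-- A-side helper: A calls ipaddress.ip_address(ip); this is CPython's IPv4 string parser
-- (4 dot-separated octets of 1-3 ASCII digits, value ≤ 255, no leading zeros), exact on the ASCII domain;
-- any input on which ip_address raises or yields an IPv6 address maps to none (A returns False there).
def pvParseOctet (cs : List Char) : Option Int :=
  if cs = [] then none
  else if ¬ cs.all (fun c => c.isDigit) then none
  else if cs.length > 3 then none
  else if cs.foldl (fun a c => a * 10 + ((c.toNat : Int) - 48)) 0 > 255 then none
  else if cs.head? = some '0' ∧ cs.length ≠ 1 then none
  else some (cs.foldl (fun a c => a * 10 + ((c.toNat : Int) - 48)) 0)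

def pvParseIPv4 (s : String) : Option (Int × Int × Int × Int) :=
  match (s.toList).splitOn '.' with
  | [a, b, c, d] => do
      let o0 ← pvParseOctet a
      let o1 ← pvParseOctet b
      let o2 ← pvParseOctet c
      let o3 ← pvParseOctet d
      pure (o0, o1, o2, o3)
  | _ => none

-- PRIVATE_NETS as (network address, prefix length); `ip4 in n` is equality of the top `prefix` bits.
def pvPrivateNets : List (Int × Nat) :=
  [(167772160, 8), (2886729728, 12), (3232235520, 16), (2130706432, 8),
   (2851995648, 16), (3758096384, 4), (4026531840, 4)]

def is_public_ipv4 (ip : String) : Bool :=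
  match pvParseIPv4 ip with
  | none => false          -- ip_address raised, or version != 4
  | some (o0, o1, o2, o3) =>
    let v : Int := o0 * 16777216 + o1 * 65536 + o2 * 256 + o3
    if pvPrivateNets.any (fun n => v / 2 ^ (32 - n.2) == n.1 / 2 ^ (32 - n.2)) then false
    else true

-- ===== PORT B =====
-- Source B's regex octet group (25[0-5]|2[0-4][0-9]|1[0-9][0-9]|[1-9][0-9]|[0-9]): each alternative is a
-- fixed-length run of digit classes, written below per part length. The octet alternatives and the
-- literal '\.' separators share no characters, so fullmatch of O\.O\.O\.O succeeds iff splitting on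
-- '.' yields exactly 4 parts, each fully matched by the alternation — this rendering of the regex
-- engine is exact, and the captured groups are exactly the parts.
def pvOctetRe (p : List Char) : Bool :=
  match p with
  | [a, b, c] =>
      (a == '2' && b == '5' && '0' ≤ c && c ≤ '5')
   || (a == '2' && '0' ≤ b && b ≤ '4' && '0' ≤ c && c ≤ '9')
   || (a == '1' && '0' ≤ b && b ≤ '9' && '0' ≤ c && c ≤ '9')
  | [a, b] => '1' ≤ a && a ≤ '9' && '0' ≤ b && b ≤ '9'
  | [a] => '0' ≤ a && a ≤ '9'
  | _ => false

-- int(m.group(k))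
def pvOctetVal (p : List Char) : Int :=
  p.foldl (fun a c => a * 10 + ((c.toNat : Int) - 48)) 0

def is_public_ipv4_alt (ip : String) : Bool :=
  match (ip.toList).splitOn '.' with
  | [p0, p1, p2, p3] =>
    if pvOctetRe p0 && pvOctetRe p1 && pvOctetRe p2 && pvOctetRe p3 then
      let o0 := pvOctetVal p0
      let o1 := pvOctetVal p1
      !(o0 == 10 || o0 == 127
        || (o0 == 172 && decide (16 ≤ o1) && decide (o1 ≤ 31))
        || (o0 == 192 && o1 == 168)
        || (o0 == 169 && o1 == 254)
        || decide (224 ≤ o0))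
    else false               -- m is None
  | _ => false               -- m is None

-- ===== PRECONDITION & SPEC =====
def Spec_is_public_ipv4 (ip : String) (out : Bool) : Prop := out = is_public_ipv4_alt ip
instance (ip : String) (out : Bool) : Decidable (Spec_is_public_ipv4 ip out) := by unfold Spec_is_public_ipv4; infer_instance

-- ===== CLAIM =====
def Claim_equal_is_public_ipv4 : Prop := ∀ (ip : String), Dom_is_public_ipv4 ip → Spec_is_public_ipv4 ip (is_public_ipv4 ip)

-- ===== LEMMAS AND PROOFS =====

theorem pvIsDigit_iff (c : Char) : c.isDigit = true ↔ 48 ≤ c.toNat ∧ c.toNat ≤ 57 := by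
  simp [Char.isDigit]
  have hcn : c.toNat = c.val.toNat := rfl
  have h48 : (48 : UInt32).toNat = 48 := rfl
  have h57 : (57 : UInt32).toNat = 57 := rfl
  constructor
  · rintro ⟨h1, h2⟩
    have a := UInt32.le_iff_toNat_le.mp h1
    have b := UInt32.le_iff_toNat_le.mp h2
    omega
  · rintro ⟨h1, h2⟩
    exact ⟨UInt32.le_iff_toNat_le.mpr (by omega), UInt32.le_iff_toNat_le.mpr (by omega)⟩

theorem pvCharLe_iff (a b : Char) : a ≤ b ↔ a.toNat ≤ b.toNat := by
  rw [Char.le_def, UInt32.le_iff_toNat_le]; rfl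

theorem pvCharEq_iff (a b : Char) : a = b ↔ a.toNat = b.toNat := by
  constructor
  · intro h; rw [h]
  · intro h; exact Char.ext (UInt32.toNat_inj.mp h)

theorem pvParseOctet_isSome (p : List Char) : (pvParseOctet p).isSome = true ↔
    (¬ p = [] ∧ p.all (fun c => c.isDigit) = true ∧ ¬ p.length > 3
      ∧ ¬ p.foldl (fun a c => a * 10 + ((c.toNat : Int) - 48)) 0 > 255
      ∧ ¬ (p.head? = some '0' ∧ p.length ≠ 1)) := by
  unfold pvParseOctet
  split_ifs <;> simp_all

-- B's regex accepts a part exactly when A's octet parse accepts it.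
theorem pvOctetRe_eq (p : List Char) : pvOctetRe p = (pvParseOctet p).isSome := by
  rw [Bool.eq_iff_iff]
  match p with
  | [] => simp [pvOctetRe, pvParseOctet]
  | [a] =>
    rw [pvParseOctet_isSome]
    simp [pvOctetRe, pvCharLe_iff, pvIsDigit_iff, pvCharEq_iff]
    omega
  | [a, b] =>
    rw [pvParseOctet_isSome]
    simp [pvOctetRe, pvCharLe_iff, pvIsDigit_iff, pvCharEq_iff]
    omega
  | [a, b, c] =>
    rw [pvParseOctet_isSome]
    simp [pvOctetRe, pvCharLe_iff, pvIsDigit_iff, pvCharEq_iff]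
    omega
  | a :: b :: c :: d :: t =>
    rw [pvParseOctet_isSome]
    simp [pvOctetRe]

-- and when both accept, the parsed value is int(group).
theorem pvParseOctet_val (p : List Char) (v : Int) (h : pvParseOctet p = some v) :
    v = pvOctetVal p := by
  unfold pvParseOctet at h
  split_ifs at h <;> simp at h
  exact h.symm

theorem pvFoldl_digits_nonneg (cs : List Char) (a : Int)
    (h : cs.all (fun c => c.isDigit) = true) (ha : 0 ≤ a) :
    0 ≤ cs.foldl (fun a c => a * 10 + ((c.toNat : Int) - 48)) a := by
  induction cs generalizing a with
  | nil => simpa using ha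
  | cons c cs ih =>
    simp only [List.all_cons, Bool.and_eq_true] at h
    refine ih _ h.2 ?_
    have hc : 48 ≤ c.toNat := ((pvIsDigit_iff c).mp h.1).1
    have : (48 : Int) ≤ (c.toNat : Int) := by exact_mod_cast hc
    nlinarith

theorem pvParseOctet_bounds (cs : List Char) (v : Int) (h : pvParseOctet cs = some v) :
    0 ≤ v ∧ v ≤ 255 := by
  unfold pvParseOctet at h
  split_ifs at h with h1 h2 h3 h4 h5 <;> simp at h
  subst h
  exact ⟨pvFoldl_digits_nonneg cs 0 h2 le_rfl, by omega⟩

theorem pvClassify_eq (o0 o1 o2 o3 : Int)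
    (b0 : 0 ≤ o0 ∧ o0 ≤ 255) (b1 : 0 ≤ o1 ∧ o1 ≤ 255)
    (b2 : 0 ≤ o2 ∧ o2 ≤ 255) (b3 : 0 ≤ o3 ∧ o3 ≤ 255) :
    (if pvPrivateNets.any (fun n => (o0*16777216+o1*65536+o2*256+o3) / 2 ^ (32 - n.2) == n.1 / 2 ^ (32 - n.2)) then false else true)
    = !(o0 == 10 || o0 == 127
        || (o0 == 172 && decide (16 ≤ o1) && decide (o1 ≤ 31))
        || (o0 == 192 && o1 == 168)
        || (o0 == 169 && o1 == 254)
        || decide (224 ≤ o0)) := by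
  simp only [pvPrivateNets, List.any_cons, List.any_nil, Bool.or_false]
  rw [Bool.eq_iff_iff]
  simp only [Bool.not_eq_true', Bool.or_eq_true, Bool.or_eq_false_iff, Bool.and_eq_false_iff,
    beq_iff_eq, beq_eq_false_iff_ne, ne_eq, decide_eq_false_iff_not, not_le]
  norm_num
  omega

-- ===== VERDICT =====
theorem is_public_ipv4_spec : Claim_equal_is_public_ipv4 := by
  unfold Claim_equal_is_public_ipv4 Spec_is_public_ipv4
  intro ip _
  unfold is_public_ipv4 is_public_ipv4_alt pvParseIPv4
  rcases hs : (ip.toList).splitOn '.' with _ | ⟨p0, _ | ⟨p1, _ | ⟨p2, _ | ⟨p3, _ | ⟨p4, t⟩⟩⟩⟩⟩ <;>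
    simp only
  rw [pvOctetRe_eq, pvOctetRe_eq, pvOctetRe_eq, pvOctetRe_eq]
  rcases h0 : pvParseOctet p0 with _ | o0 <;>
    rcases h1 : pvParseOctet p1 with _ | o1 <;>
    rcases h2 : pvParseOctet p2 with _ | o2 <;>
    rcases h3 : pvParseOctet p3 with _ | o3 <;>
    simp only [Option.isSome, Bool.false_and, Bool.and_false, Bool.true_and, Bool.and_true,
      Option.bind, if_false, if_true] <;> try rfl
  rw [pvParseOctet_val p0 o0 h0, pvParseOctet_val p1 o1 h1] at *
  exact pvClassify_eq _ _ _ _ (pvParseOctet_bounds _ _ h0) (pvParseOctet_bounds _ _ h1)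
    (pvParseOctet_bounds _ _ h2) (pvParseOctet_bounds _ _ h3)
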